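-- pv_equiv track=rewrite | github.com/dong-uk-kim97/code_study | 프로그래머스/3/43238. 입국심사/입국심사.py | solution
-- ===== SOURCE A (Python) =====
-- def solution(n, times):
--     # 1. 0분부터 가장 오래 걸리는 소요 시간을 시작과 끝으로 지정
--     answer = 0
--     left, right = 1, max(times) * n
--
--     # 2. 시작과 끝의 중간 시간에서 최대 몇 명 심사할 수 있을지 계산
--     while left <= right:
--         mid = (left+right) // 2
--         people = 0
--         test = []
--
--         for time in times:
--             people += mid//time
--             if people >= n: break
--
--     # 3. 심사해야 할 사람의 숫자보다 많으면 끝의 크기를 줄이고, 적으면 시작의 크기를 줄여 이진 탐색을 수행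
--         if people >=n:
--             answer = mid
--             right = mid -1
--         elif people < n:
--             left = mid + 1
--
--     return answer
-- ===== SOURCE B (Python) =====
-- def solution(n, times):
--     # Jump to an arithmetic lower bound for the answer, then walk forward one
--     # completion event at a time until n people have been inspected.
--     if n <= 0:
--         return 0
--     if any(d <= 0 for d in times):
--         raise ValueError("gate durations must be positive")
--     D = 1
--     for d in times:
--         D *= d                       # common denominator of the gate rates
--     S = sum(D // d for d in times)   # people inspected per D minutes
--     t = (n * D) // S                 # at time t*, S*t* >= n*D, so this is <= t*
--     while sum(t // d for d in times) < n:
--         t = min((t // d + 1) * d for d in times)   # next completion event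
--     return t
-- ===== Notes on version B (the rewrite author's own statement) =====
-- stated objective: alternative
-- what changed: Replaces A's binary search over candidate times (re-counting served people at each probe) with a direct computation: jump to the arithmetic lower bound (n*prod)//sum_of_rates of the answer, then advance through successive gate-completion events until n people are served.
-- outside the precondition, e.g. on solution(2, [-3, -1]): A returns 0, B raises ValueError; on solution(1, [0, 2]): A raises ZeroDivisionError, B raises ValueError
import Mathlib
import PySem

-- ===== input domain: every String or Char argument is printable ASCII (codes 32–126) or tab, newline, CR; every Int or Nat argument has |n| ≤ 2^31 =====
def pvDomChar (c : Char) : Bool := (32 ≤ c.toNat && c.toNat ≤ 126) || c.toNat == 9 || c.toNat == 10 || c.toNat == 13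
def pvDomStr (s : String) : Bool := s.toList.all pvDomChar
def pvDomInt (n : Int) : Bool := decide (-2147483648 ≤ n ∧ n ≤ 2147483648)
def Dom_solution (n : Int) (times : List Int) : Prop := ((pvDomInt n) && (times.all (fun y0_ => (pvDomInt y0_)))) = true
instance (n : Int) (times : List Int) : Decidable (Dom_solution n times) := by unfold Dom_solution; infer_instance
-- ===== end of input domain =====

-- B replaces A's binary search on the answer by an arithmetic jump to a lower bound of
-- the answer followed by a short event walk over gate completion times; alternative
-- algorithm, no speed claim.

-- ===== PORT A =====
-- the for-loop over times with its early break ('people += mid//time; if people >= n: break')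
def peopleLoop (n mid : Int) : List Int → Int → Int
  | [], people => people
  | t :: ts, people =>
      let p := people + PySem.Int.floordiv mid t
      if n ≤ p then p else peopleLoop n mid ts p

-- the while-loop ('while left <= right: …')
def bsearch (n : Int) (times : List Int) (left right answer : Int) : Int :=
  if h : left ≤ right then
    let mid := PySem.Int.floordiv (left + right) 2
    let people := peopleLoop n mid times 0
    if n ≤ people then bsearch n times left (mid - 1) mid
    else bsearch n times (mid + 1) right answer
  else answer
termination_by (right + 1 - left).toNat
decreasing_by
  · have := PySem.Int.floordiv_two_mid_bounds h; omega
  · have := PySem.Int.floordiv_two_mid_bounds h; omega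

def solution (n : Int) (times : List Int) : Int :=
  -- max(times) raises ValueError on []; Pre_ excludes that, so .getD 0 is exact there
  let mx := (PySem.List.max? times (fun x => x)).getD 0
  bsearch n times 1 (mx * n) 0

-- ===== PORT B =====
-- 'sum(t // d for d in times)'
def countB (times : List Int) (t : Int) : Int :=
  (times.map (fun d => PySem.Int.floordiv t d)).sum

-- 'min((t // d + 1) * d for d in times)'; min() raises ValueError on an empty list,
-- which Pre_ excludes, so the .getD 0 default is unreachable there
def nextEvent (times : List Int) (t : Int) : Int :=
  (PySem.List.min? (times.map (fun d => (PySem.Int.floordiv t d + 1) * d)) (fun x => x)).getD 0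

-- 'while sum(t // d for d in times) < n: t = min(…)'; the fuel only makes the loop a
-- total function — inside Pre_ it is proved large enough and is never exhausted
def walk (n : Int) (times : List Int) : Nat → Int → Int
  | 0, t => t
  | fuel + 1, t =>
      if countB times t < n then walk n times fuel (nextEvent times t) else t

def solution_alt (n : Int) (times : List Int) : Int :=
  if n ≤ 0 then 0
  -- 'raise ValueError' for a non-positive duration: excluded by Pre_; the port
  -- returns the junk value 0 there (no comparison is claimed outside Pre_)
  else if times.any (fun d => d ≤ 0) then 0
  else
    let D := times.foldl (· * ·) 1
    let S := (times.map (fun d => PySem.Int.floordiv D d)).sum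
    let t0 := PySem.Int.floordiv (n * D) S
    walk n times (n - countB times t0).toNat t0

-- ===== PRECONDITION & SPEC =====
-- Pre_ admits nonempty all-positive durations (the task's domain) and, for n ≤ 0, any
-- nonempty times with a nonnegative element (A's search window is empty and it returns 0).
-- It excludes empty times (A's max(times) raises ValueError) and non-positive durations
-- with n ≥ 1: there a zero duration makes A raise ZeroDivisionError whenever its loop
-- runs, and on negative durations A binary-searches a non-monotone count, so its value is
-- an accident of the search; B's event walk is meaningful only for positive durations.
def Pre_solution (n : Int) (times : List Int) : Prop :=
  times ≠ [] ∧ ((∀ t ∈ times, 0 < t) ∨ (n ≤ 0 ∧ ∃ t ∈ times, 0 ≤ t))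
instance (n : Int) (times : List Int) : Decidable (Pre_solution n times) := by
  unfold Pre_solution; infer_instance

def pvWitness_solution : Int × List Int := (6, [7, 10])

def Spec_solution (n : Int) (times : List Int) (out : Int) : Prop := out = solution_alt n times
instance (n : Int) (times : List Int) (out : Int) : Decidable (Spec_solution n times out) := by
  unfold Spec_solution; infer_instance

-- ===== CLAIM (what is proved, stated in full; the proofs are below) =====
def Claim_equal_solution : Prop := ∀ (n : Int) (times : List Int), Dom_solution n times → Pre_solution n times → Spec_solution n times (solution n times)

-- ===== LEMMAS AND PROOFS =====

lemma floordiv_nonneg_of (a b : Int) (ha : 0 ≤ a) (hb : 0 < b) :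
    0 ≤ PySem.Int.floordiv a b := by
  have := (PySem.Int.le_floordiv_iff_mul_le (a := a) (b := b) (q := 0) hb)
  omega

lemma floordiv_mul_le (a b : Int) (hb : 0 < b) : PySem.Int.floordiv a b * b ≤ a := by
  have := PySem.Int.floordiv_mul_add_mod a b
  have := PySem.Int.mod_nonneg a hb
  omega

lemma countB_mono (times : List Int) (hd : ∀ d ∈ times, 0 < d) {a b : Int} (hab : a ≤ b) :
    countB times a ≤ countB times b := by
  unfold countB
  refine List.sum_le_sum ?_
  intro d hdm
  have hd' := hd d hdm
  have h1 := floordiv_mul_le a d hd'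
  have := (PySem.Int.le_floordiv_iff_mul_le (a := b) (b := d)
    (q := PySem.Int.floordiv a d) hd')
  omega

lemma countB_zero (times : List Int) (hd : ∀ d ∈ times, 0 < d) : countB times 0 = 0 := by
  unfold countB
  induction times with
  | nil => simp
  | cons t ts ih =>
      have ht := hd t (by simp)
      have h0 : PySem.Int.floordiv 0 t = 0 := by
        rw [PySem.Int.floordiv_eq_iff_of_pos ht]; omega
      simp only [List.map_cons, List.sum_cons, h0, zero_add]
      exact ih (fun d hdm => hd d (by simp [hdm]))

lemma countB_nonneg (times : List Int) (hd : ∀ d ∈ times, 0 < d) (t : Int) (ht : 0 ≤ t) :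
    0 ≤ countB times t := by
  have := countB_mono times hd ht
  rw [countB_zero times hd] at this
  exact this

lemma peopleLoop_ge_iff (n mid : Int) (hmid : 0 ≤ mid) :
    ∀ (ts : List Int) (acc : Int), (∀ d ∈ ts, 0 < d) →
      (n ≤ peopleLoop n mid ts acc ↔ n ≤ acc + countB ts mid) := by
  intro ts
  induction ts with
  | nil => intro acc _; simp [peopleLoop, countB]
  | cons t ts ih =>
      intro acc hd
      have ht := hd t (by simp)
      have hrest : ∀ d ∈ ts, 0 < d := fun d hdm => hd d (by simp [hdm])
      have hterm : 0 ≤ PySem.Int.floordiv mid t := floordiv_nonneg_of mid t hmid ht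
      have hsum : 0 ≤ countB ts mid := countB_nonneg ts hrest mid hmid
      simp only [peopleLoop]
      by_cases hb : n ≤ acc + PySem.Int.floordiv mid t
      · rw [if_pos hb]
        constructor
        · intro _
          show n ≤ acc + countB (t :: ts) mid
          unfold countB at hsum ⊢
          simp only [List.map_cons, List.sum_cons]
          omega
        · intro _; exact hb
      · rw [if_neg hb]
        rw [ih (acc + PySem.Int.floordiv mid t) hrest]
        unfold countB
        simp only [List.map_cons, List.sum_cons]
        constructor <;> intro <;> omega

-- binary-search correctness: if a is the least admissible time, bsearch homes in on it
lemma bsearch_eq (n : Int) (times : List Int) (hd : ∀ d ∈ times, 0 < d)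
    (a : Int) (ha1 : 1 ≤ a) (hQa : n ≤ countB times a)
    (hleast : ∀ t : Int, 1 ≤ t → n ≤ countB times t → a ≤ t) :
    ∀ (k : Nat) (l r answer : Int), (r + 1 - l).toNat ≤ k →
      1 ≤ l → l ≤ a → a ≤ r + 1 → (a = r + 1 → answer = a) →
      bsearch n times l r answer = a := by
  intro k
  induction k with
  | zero =>
      intro l r answer hk hl hla har hend
      rw [bsearch]
      have hlr : ¬ l ≤ r := by omega
      simp only [hlr, dif_neg, not_false_iff]
      exact hend (by omega)
  | succ k ih =>
      intro l r answer hk hl hla har hend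
      rw [bsearch]
      by_cases hlr : l ≤ r
      · simp only [hlr, dif_pos]
        have hmid := PySem.Int.floordiv_two_mid_bounds hlr
        set mid := PySem.Int.floordiv (l + r) 2 with hmiddef
        have hQiff := peopleLoop_ge_iff n mid (by omega) times 0 hd
        by_cases hp : n ≤ peopleLoop n mid times 0
        · simp only [hp, if_pos]
          have hQmid : n ≤ countB times mid := by
            have := hQiff.mp hp; omega
          have hamid : a ≤ mid := hleast mid (by omega) hQmid
          exact ih l (mid - 1) mid (by omega) hl hla (by omega) (by omega)
        · simp only [hp, if_neg, not_false_iff]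
          have hQmid : ¬ n ≤ countB times mid := by
            intro hcm
            exact hp (hQiff.mpr (by omega))
          have hma : mid < a := by
            by_contra hc
            push_neg at hc
            exact hQmid (le_trans hQa (countB_mono times hd hc))
          exact ih (mid + 1) r answer (by omega) (by omega) (by omega) har hend
      · simp only [hlr, dif_neg, not_false_iff]
        exact hend (by omega)

-- max(times) bounds every duration and belongs to times
lemma max_facts (times : List Int) (hne : times ≠ []) :
    let mx := (PySem.List.max? times (fun x => x)).getD 0
    mx ∈ times ∧ ∀ d ∈ times, d ≤ mx := by
  intro mx
  have h : ∃ m, PySem.List.max? times (fun x => x) = some m := by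
    cases hmax : PySem.List.max? times (fun x => x) with
    | none => exact absurd ((PySem.List.max?_eq_none_iff times (fun x => x)).mp hmax) hne
    | some m => exact ⟨m, rfl⟩
  obtain ⟨m, hm⟩ := h
  have : mx = m := by simp [mx, hm]
  rw [this]
  exact ⟨PySem.List.max?_mem hm, PySem.List.max?_isMax hm⟩

-- at time max*n the gates serve at least n people
lemma countB_top (times : List Int) (hd : ∀ d ∈ times, 0 < d) (hne : times ≠ [])
    (n : Int) (hn : 1 ≤ n) :
    n ≤ countB times ((PySem.List.max? times (fun x => x)).getD 0 * n) := by
  obtain ⟨hmem, hmax⟩ := max_facts times hne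
  set mx := (PySem.List.max? times (fun x => x)).getD 0 with hmx
  have hmxpos : 0 < mx := hd mx hmem
  have hterm : ∀ d ∈ times, n ≤ PySem.Int.floordiv (mx * n) d := by
    intro d hdm
    have hdpos := hd d hdm
    rw [PySem.Int.le_floordiv_iff_mul_le hdpos]
    nlinarith [hmax d hdm]
  obtain ⟨t, ts, rfl⟩ := List.exists_cons_of_ne_nil hne
  have h1 := hterm t (by simp)
  have hnn : 0 ≤ (ts.map (fun d => PySem.Int.floordiv (mx * n) d)).sum := by
    refine List.sum_nonneg ?_
    intro x hx
    obtain ⟨d, hdm, rfl⟩ := List.mem_map.mp hx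
    refine floordiv_nonneg_of _ _ (by nlinarith) (hd d (by simp [hdm]))
  unfold countB
  simp only [List.map_cons, List.sum_cons]
  omega

-- the least admissible time exists (classically), is ≥ 1 and is at most max*n
lemma tstar_exists (times : List Int) (hd : ∀ d ∈ times, 0 < d) (hne : times ≠ [])
    (n : Int) (hn : 1 ≤ n) :
    ∃ a : Int, 1 ≤ a ∧ n ≤ countB times a ∧
      (∀ z : Int, n ≤ countB times z → a ≤ z) := by
  have hbdd : ∀ z : Int, n ≤ countB times z → 1 ≤ z := by
    intro z hz
    by_contra hc
    push_neg at hc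
    have := countB_mono times hd (show z ≤ 0 by omega)
    rw [countB_zero times hd] at this
    omega
  obtain ⟨a, ha, hmin⟩ := Int.exists_least_of_bdd
    (P := fun z => n ≤ countB times z) ⟨1, hbdd⟩
    ⟨_, countB_top times hd hne n hn⟩
  exact ⟨a, hbdd a ha, ha, hmin⟩

-- ---- event-walk side ----

lemma floordiv_of_dvd {x d : Int} (hd : 0 < d) (hdvd : d ∣ x) :
    PySem.Int.floordiv x d * d = x := by
  obtain ⟨c, rfl⟩ := hdvd
  have : PySem.Int.floordiv (d * c) d = c := by
    rw [PySem.Int.floordiv_eq_iff_of_pos hd]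
    constructor <;> nlinarith
  rw [this]; ring

-- the product of the durations, as B's loop computes it
lemma prod_facts (times : List Int) (hd : ∀ d ∈ times, 0 < d) :
    0 < times.foldl (· * ·) 1 ∧ ∀ d ∈ times, d ∣ times.foldl (· * ·) 1 := by
  rw [← List.prod_eq_foldl]
  constructor
  · exact List.prod_pos hd
  · intro d hdm
    exact List.dvd_prod hdm

-- S = sum of D // d is positive for nonempty positive times
lemma S_pos (times : List Int) (hd : ∀ d ∈ times, 0 < d) (hne : times ≠ []) :
    0 < (times.map (fun d => PySem.Int.floordiv (times.foldl (· * ·) 1) d)).sum := by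
  obtain ⟨hD, hdvd⟩ := prod_facts times hd
  refine List.sum_pos _ ?_ (by simpa using hne)
  intro x hx
  obtain ⟨d, hdm, rfl⟩ := List.mem_map.mp hx
  have hdpos := hd d hdm
  have := floordiv_of_dvd hdpos (hdvd d hdm)
  nlinarith

-- counting rate bound: countB(t) * D ≤ S * t  (each gate serves at most t/d people)
lemma countB_rate (times : List Int) (hd : ∀ d ∈ times, 0 < d) (t : Int) :
    countB times t * times.foldl (· * ·) 1 ≤
      (times.map (fun d => PySem.Int.floordiv (times.foldl (· * ·) 1) d)).sum * t := by
  obtain ⟨hD, hdvd⟩ := prod_facts times hd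
  set D := times.foldl (· * ·) 1 with hDdef
  have hpt : ∀ d ∈ times, PySem.Int.floordiv t d * D ≤ PySem.Int.floordiv D d * t := by
    intro d hdm
    have hdpos := hd d hdm
    have he := floordiv_of_dvd hdpos (hdvd d hdm)
    have h1 := floordiv_mul_le t d hdpos
    have hE : 0 < PySem.Int.floordiv D d := by nlinarith
    calc PySem.Int.floordiv t d * D
        = PySem.Int.floordiv D d * (PySem.Int.floordiv t d * d) := by
          conv_lhs => rw [← he]
          ring
      _ ≤ PySem.Int.floordiv D d * t := by nlinarith
  calc countB times t * D
      = (times.map (fun d => PySem.Int.floordiv t d * D)).sum := by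
        unfold countB; rw [List.sum_map_mul_right]
    _ ≤ (times.map (fun d => PySem.Int.floordiv D d * t)).sum := List.sum_le_sum hpt
    _ = (times.map (fun d => PySem.Int.floordiv D d)).sum * t := by
        rw [List.sum_map_mul_right]

-- the next completion event: strictly later, at most every candidate, and one gate
-- completes exactly there
lemma nextEvent_facts (times : List Int) (hd : ∀ d ∈ times, 0 < d) (hne : times ≠ [])
    (t : Int) :
    t < nextEvent times t ∧
    (∀ d ∈ times, nextEvent times t ≤ (PySem.Int.floordiv t d + 1) * d) ∧
    (∃ d ∈ times, nextEvent times t = (PySem.Int.floordiv t d + 1) * d) := by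
  have hmapne : times.map (fun d => (PySem.Int.floordiv t d + 1) * d) ≠ [] := by
    simpa using hne
  obtain ⟨m, hm⟩ : ∃ m, PySem.List.min? (times.map (fun d => (PySem.Int.floordiv t d + 1) * d))
      (fun x => x) = some m := by
    cases hmin : PySem.List.min? (times.map (fun d => (PySem.Int.floordiv t d + 1) * d))
        (fun x => x) with
    | none => exact absurd ((PySem.List.min?_eq_none_iff _ _).mp hmin) hmapne
    | some m => exact ⟨m, rfl⟩
  have heq : nextEvent times t = m := by unfold nextEvent; rw [hm]; rfl
  have hmem := PySem.List.min?_mem hm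
  obtain ⟨d0, hd0m, hd0⟩ := List.mem_map.mp hmem
  refine ⟨?_, ?_, ⟨d0, hd0m, by rw [heq, hd0]⟩⟩
  · rw [heq, ← hd0]
    have hdpos := hd d0 hd0m
    have h1 := floordiv_mul_le t d0 hdpos
    have := PySem.Int.floordiv_mul_add_mod t d0
    have := PySem.Int.mod_lt t hdpos
    nlinarith
  · intro d hdm
    rw [heq]
    exact PySem.List.min?_isMin hm _ (List.mem_map.mpr ⟨d, hdm, rfl⟩)

-- one unit of progress: strictly more people are served by the next event …
lemma countB_nextEvent_ge (times : List Int) (hd : ∀ d ∈ times, 0 < d) (hne : times ≠ [])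
    (t : Int) : countB times t + 1 ≤ countB times (nextEvent times t) := by
  obtain ⟨hgt, hle, d0, hd0m, hd0⟩ := nextEvent_facts times hd hne t
  set s := nextEvent times t with hsdef
  obtain ⟨l1, l2, hsplit⟩ := List.append_of_mem hd0m
  have hpt : ∀ d ∈ times, PySem.Int.floordiv t d ≤ PySem.Int.floordiv s d := by
    intro d hdm
    have hdpos := hd d hdm
    have h1 := floordiv_mul_le t d hdpos
    have := (PySem.Int.le_floordiv_iff_mul_le (a := s) (b := d)
      (q := PySem.Int.floordiv t d) hdpos)
    omega
  have hstrict : PySem.Int.floordiv t d0 + 1 ≤ PySem.Int.floordiv s d0 := by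
    have hdpos := hd d0 hd0m
    rw [PySem.Int.le_floordiv_iff_mul_le hdpos]
    omega
  unfold countB
  rw [hsplit]
  simp only [List.map_append, List.map_cons, List.sum_append, List.sum_cons]
  have h1 : (l1.map (fun d => PySem.Int.floordiv t d)).sum ≤
      (l1.map (fun d => PySem.Int.floordiv s d)).sum :=
    List.sum_le_sum (fun d hdm => hpt d (by rw [hsplit]; simp [hdm]))
  have h2 : (l2.map (fun d => PySem.Int.floordiv t d)).sum ≤
      (l2.map (fun d => PySem.Int.floordiv s d)).sum :=
    List.sum_le_sum (fun d hdm => hpt d (by rw [hsplit]; simp [hdm]))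
  omega

-- … and nobody new was served strictly before it
lemma countB_before_nextEvent (times : List Int) (hd : ∀ d ∈ times, 0 < d)
    (hne : times ≠ []) (t : Int) :
    countB times (nextEvent times t - 1) ≤ countB times t := by
  obtain ⟨hgt, hle, _⟩ := nextEvent_facts times hd hne t
  unfold countB
  refine List.sum_le_sum ?_
  intro d hdm
  have hdpos := hd d hdm
  have hlt : PySem.Int.floordiv (nextEvent times t - 1) d < PySem.Int.floordiv t d + 1 := by
    rw [PySem.Int.floordiv_lt_iff_lt_mul hdpos]
    have := hle d hdm
    omega
  omega

-- the walk reaches exactly the least admissible time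
lemma walk_eq (times : List Int) (hd : ∀ d ∈ times, 0 < d) (hne : times ≠ [])
    (n : Int) (a : Int) (hQa : n ≤ countB times a)
    (hleast : ∀ z : Int, n ≤ countB times z → a ≤ z) :
    ∀ (fuel : Nat) (t : Int), t ≤ a → (n - countB times t).toNat ≤ fuel →
      walk n times fuel t = a := by
  intro fuel
  induction fuel with
  | zero =>
      intro t hta hfuel
      have hct : n ≤ countB times t := by omega
      have := hleast t hct
      simp only [walk]
      omega
  | succ fuel ih =>
      intro t hta hfuel
      simp only [walk]
      by_cases hc : countB times t < n
      · rw [if_pos hc]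
        have hprog := countB_nextEvent_ge times hd hne t
        have hbefore := countB_before_nextEvent times hd hne t
        have hsle : nextEvent times t ≤ a := by
          by_contra hgt
          push_neg at hgt
          have : countB times a ≤ countB times (nextEvent times t - 1) :=
            countB_mono times hd (by omega)
          omega
        exact ih (nextEvent times t) hsle (by omega)
      · rw [if_neg hc]
        have := hleast t (by omega)
        omega

-- B computes the least admissible time when n ≥ 1 and all durations are positive
lemma solution_alt_eq (times : List Int) (hd : ∀ d ∈ times, 0 < d) (hne : times ≠ [])
    (n : Int) (hn : 1 ≤ n) (a : Int) (hQa : n ≤ countB times a)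
    (hleast : ∀ z : Int, n ≤ countB times z → a ≤ z) :
    solution_alt n times = a := by
  unfold solution_alt
  rw [if_neg (by omega), if_neg (by
    simp only [List.any_eq_true, not_exists]
    intro d
    by_cases hdm : d ∈ times
    · have := hd d hdm; simp [hdm]; omega
    · simp [hdm])]
  obtain ⟨hD, _⟩ := prod_facts times hd
  have hS := S_pos times hd hne
  set D := times.foldl (· * ·) 1 with hDdef
  set S := (times.map (fun d => PySem.Int.floordiv D d)).sum with hSdef
  set t0 := PySem.Int.floordiv (n * D) S with ht0def
  have ht0a : t0 ≤ a := by
    have hrate := countB_rate times hd a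
    rw [← hDdef, ← hSdef] at hrate
    have hnD : n * D ≤ S * a := by nlinarith
    have : PySem.Int.floordiv (n * D) S < a + 1 := by
      rw [PySem.Int.floordiv_lt_iff_lt_mul hS]
      nlinarith
    omega
  exact walk_eq times hd hne n a hQa hleast _ t0 ht0a (le_refl _)

-- ===== VERDICT (by name: the statement is the Claim_ definition above) =====
theorem solution_spec : Claim_equal_solution := by
  intro n times _ hpre
  obtain ⟨hne, hcase⟩ := hpre
  unfold Spec_solution
  obtain ⟨hmem, hmax⟩ := max_facts times hne
  rcases hcase with hd | ⟨hn0, t0, ht0m, ht00⟩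
  case inr =>
    -- n ≤ 0 with a nonnegative duration: the window [1, max*n] is empty, nobody is served
    unfold solution
    have htop : (PySem.List.max? times (fun x => x)).getD 0 * n ≤ 0 :=
      mul_nonpos_of_nonneg_of_nonpos (le_trans ht00 (hmax t0 ht0m)) hn0
    rw [bsearch]
    have h1 : ¬ (1 : Int) ≤ (PySem.List.max? times (fun x => x)).getD 0 * n := by omega
    simp only [h1, dif_neg, not_false_iff]
    unfold solution_alt
    rw [if_pos hn0]
  case inl =>
    by_cases hn : 1 ≤ n
    · -- n ≥ 1: both sides compute the least time at which n people are served
      obtain ⟨a, ha1, hQa, hleast⟩ := tstar_exists times hd hne n hn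
      unfold solution
      set mx := (PySem.List.max? times (fun x => x)).getD 0 with hmx
      have hmxpos : 0 < mx := hd mx hmem
      have htop : a ≤ mx * n :=
        hleast (mx * n) (countB_top times hd hne n hn)
      rw [solution_alt_eq times hd hne n hn a hQa hleast]
      exact bsearch_eq n times hd a ha1 hQa
        (fun t _ h => hleast t h) (mx * n + 1 - 1).toNat 1 (mx * n) 0
        (by omega) (by omega) ha1 (by omega) (by omega)
    · -- n ≤ 0 with positive durations: same empty window
      push_neg at hn
      unfold solution
      set mx := (PySem.List.max? times (fun x => x)).getD 0 with hmx
      have hmxpos : 0 < mx := hd mx hmem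
      have htop : mx * n ≤ 0 := by nlinarith
      rw [bsearch]
      have h1 : ¬ (1 : Int) ≤ mx * n := by omega
      simp only [h1, dif_neg, not_false_iff]
      unfold solution_alt
      rw [if_pos (by omega)]
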